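-- pv_equiv track=rewrite | github.com/kmdkuk/someone-dotfiles | articles.py | apply_inferences
-- ===== SOURCE A (Python) =====
-- def apply_inferences(tags, inferences):
--     """Apply tag inferences recursively."""
--     if not inferences:
--         return tags
--
--     current_tags = set(tags)
--
--     while True:
--         added = False
--         # inferences: {"Parent": ["Child", ...]}
--         for parent, children in inferences.items():
--             if parent in current_tags:
--                 continue
--             # If any child is present, add parent
--             if any(child in current_tags for child in children):
--                 current_tags.add(parent)
--                 added = True
--
--         if not added:
--             break
--
--     return sorted(list(current_tags))
-- ===== SOURCE B (Python) =====
-- def apply_inferences(tags, inferences):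
--     """Apply tag inferences recursively: one-pass worklist propagation over a child->parents index."""
--     if not inferences:
--         return tags
--
--     parents_of = {}
--     for parent, children in inferences.items():
--         for child in children:
--             parents_of.setdefault(child, []).append(parent)
--
--     reached = set()
--     stack = list(tags)
--     while stack:
--         t = stack.pop()
--         if t in reached:
--             continue
--         reached.add(t)
--         for p in parents_of.get(t, []):
--             if p not in reached:
--                 stack.append(p)
--
--     return sorted(reached)
-- ===== Notes on version B (the rewrite author's own statement) =====
-- stated objective: alternative
-- what changed: A rescans the whole inference table in repeated full passes until a fixpoint; B builds a child->parents index once and propagates with a worklist, processing each tag once and firing each index entry once.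
import Mathlib
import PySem

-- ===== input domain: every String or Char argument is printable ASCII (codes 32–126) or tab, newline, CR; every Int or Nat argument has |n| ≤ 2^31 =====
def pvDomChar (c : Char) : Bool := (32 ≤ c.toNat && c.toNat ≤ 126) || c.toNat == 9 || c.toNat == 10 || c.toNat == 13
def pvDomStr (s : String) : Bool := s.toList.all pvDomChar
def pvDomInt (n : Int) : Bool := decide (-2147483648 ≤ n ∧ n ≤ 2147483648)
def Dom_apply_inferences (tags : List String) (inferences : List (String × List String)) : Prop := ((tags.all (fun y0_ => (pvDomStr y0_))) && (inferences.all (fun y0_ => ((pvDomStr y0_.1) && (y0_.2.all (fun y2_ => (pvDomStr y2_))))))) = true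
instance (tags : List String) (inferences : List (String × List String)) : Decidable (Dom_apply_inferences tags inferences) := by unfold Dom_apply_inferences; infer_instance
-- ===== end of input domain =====

-- B replaces A's repeated full passes over the inference table (re-scanned until a pass adds
-- nothing) with a single worklist propagation over a child->parents index; same returned value.

-- ===== PORT A =====
-- one `for parent, children in inferences.items()` pass; state = (current_tags, added)
def pvStepA (acc : PySem.Set String × Bool) (pc : String × List String) : PySem.Set String × Bool :=
  if PySem.Set.contains acc.1 pc.1 then acc
  else if pc.2.any (fun c => PySem.Set.contains acc.1 c) then (PySem.Set.add acc.1 pc.1, true)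
  else acc

def pvPassA (inferences : List (String × List String)) (s : PySem.Set String) :
    PySem.Set String × Bool :=
  inferences.foldl pvStepA (s, false)

-- the `while True` loop; Python always terminates after at most len(inferences)+1 passes
-- (each pass that sets `added` puts at least one more key of `inferences` into the set),
-- so the fuel below is provably enough iterations and the port is exact.
def pvLoopA (inferences : List (String × List String)) : Nat → PySem.Set String → PySem.Set String
  | 0, s => s
  | fuel + 1, s =>
    let r := pvPassA inferences s
    if r.2 then pvLoopA inferences fuel r.1 else r.1

def apply_inferences (tags : List String) (inferences : List (String × List String)) : List String :=
  if inferences.isEmpty then tags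
  else PySem.List.sorted (pvLoopA inferences (inferences.length + 1) (PySem.Set.ofList tags)) (fun x => x)

-- ===== PORT B =====
-- parents_of: child -> list of parents (setdefault(child, []).append(parent))
def pvIndex (inferences : List (String × List String)) : PySem.Dict String (List String) :=
  inferences.foldl
    (fun d pc => pc.2.foldl (fun d c => d.modify c [] (fun l => l ++ [pc.1])) d)
    PySem.Dict.empty

-- the `while stack` worklist.  The Lean stack keeps its top at the HEAD (Python pops from the
-- end); the set of reached tags is independent of pop order (both compute the closure proved
-- below) and only that set reaches the sorted output, so the port is exact.  Python's loop
-- always terminates (each tag enters `reached` once, each index entry pushes once), so the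
-- fuel len(tags) + total-children + 1 is provably enough iterations.
def pvLoopB (idx : PySem.Dict String (List String)) :
    Nat → PySem.Set String → List String → PySem.Set String
  | 0, reached, _ => reached
  | _ + 1, reached, [] => reached
  | fuel + 1, reached, t :: rest =>
    if PySem.Set.contains reached t then pvLoopB idx fuel reached rest
    else
      pvLoopB idx fuel (PySem.Set.add reached t)
        (((idx.getD t []).filter (fun p => !(PySem.Set.contains (PySem.Set.add reached t) p))) ++ rest)

def apply_inferences_alt (tags : List String) (inferences : List (String × List String)) : List String :=
  if inferences.isEmpty then tags
  else
    PySem.List.sorted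
      (pvLoopB (pvIndex inferences)
        (tags.length + (inferences.map (fun pc => pc.2.length)).sum + 1)
        PySem.Set.empty tags)
      (fun x => x)

-- ===== PRECONDITION & SPEC =====
def Spec_apply_inferences (tags : List String) (inferences : List (String × List String)) (out : List String) : Prop := out = apply_inferences_alt tags inferences
instance (tags : List String) (inferences : List (String × List String)) (out : List String) : Decidable (Spec_apply_inferences tags inferences out) := by unfold Spec_apply_inferences; infer_instance

-- ===== CLAIM (what is proved, stated in full; the proofs are below) =====
def Claim_equal_apply_inferences : Prop := ∀ (tags : List String) (inferences : List (String × List String)), Dom_apply_inferences tags inferences → Spec_apply_inferences tags inferences (apply_inferences tags inferences)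

-- ===== LEMMAS AND PROOFS =====

-- `pvReach inf base t` : t is in the closure of `base` under the inference rules.
inductive pvReach (inf : List (String × List String)) (base : List String) : String → Prop
  | base (t : String) : t ∈ base → pvReach inf base t
  | step (p : String) (cs : List String) (c : String) :
      (p, cs) ∈ inf → c ∈ cs → pvReach inf base c → pvReach inf base p

def pvClosed (inf : List (String × List String)) (S : List String) : Prop :=
  ∀ pc ∈ inf, (∃ c ∈ pc.2, c ∈ S) → pc.1 ∈ S

theorem pvContains_eq_false (s : PySem.Set String) (x : String) :
    PySem.Set.contains s x = false ↔ x ∉ s := by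
  constructor
  · intro h hm
    rw [(PySem.Set.contains_iff _ _).mpr hm] at h
    cases h
  · intro h
    rcases hb : PySem.Set.contains s x with _ | _
    · rfl
    · exact absurd ((PySem.Set.contains_iff _ _).mp hb) h

theorem pvNotContains (s : PySem.Set String) (x : String) :
    (!(PySem.Set.contains s x)) = true ↔ x ∉ s := by
  rw [Bool.not_eq_true', pvContains_eq_false]

theorem pvReach_subset (inf : List (String × List String)) (base : List String)
    (S : List String) (hcl : pvClosed inf S) (hb : ∀ t ∈ base, t ∈ S) :
    ∀ x, pvReach inf base x → x ∈ S := by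
  intro x h
  induction h with
  | base t ht => exact hb t ht
  | step p cs c hin hc _ ih => exact hcl (p, cs) hin ⟨c, hc, ih⟩

-- ---- A-side ----
theorem pvStepA_cases (acc : PySem.Set String × Bool) (pc : String × List String) :
    (PySem.Set.contains acc.1 pc.1 = true ∧ pvStepA acc pc = acc) ∨
      (PySem.Set.contains acc.1 pc.1 = false ∧
        pc.2.any (fun c => PySem.Set.contains acc.1 c) = true ∧
        pvStepA acc pc = (PySem.Set.add acc.1 pc.1, true)) ∨
      (PySem.Set.contains acc.1 pc.1 = false ∧
        pc.2.any (fun c => PySem.Set.contains acc.1 c) = false ∧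
        pvStepA acc pc = acc) := by
  unfold pvStepA
  by_cases h1 : PySem.Set.contains acc.1 pc.1 = true
  · exact Or.inl ⟨h1, by rw [if_pos h1]⟩
  · by_cases h2 : pc.2.any (fun c => PySem.Set.contains acc.1 c) = true
    · exact Or.inr (Or.inl ⟨by simpa using h1, h2, by rw [if_neg h1, if_pos h2]⟩)
    · exact Or.inr (Or.inr ⟨by simpa using h1, by simpa using h2, by rw [if_neg h1, if_neg h2]⟩)

theorem pvPassA_mono (l : List (String × List String)) (acc : PySem.Set String × Bool) :
    ∀ x ∈ acc.1, x ∈ (l.foldl pvStepA acc).1 := by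
  induction l generalizing acc with
  | nil => intro x hx; simpa using hx
  | cons pc l ih =>
    intro x hx
    simp only [List.foldl_cons]
    apply ih
    rcases pvStepA_cases acc pc with ⟨_, hs⟩ | ⟨_, _, hs⟩ | ⟨_, _, hs⟩ <;> rw [hs]
    · exact hx
    · exact (PySem.Set.mem_add _ _ _).mpr (Or.inl hx)
    · exact hx

theorem pvPassA_nodup (l : List (String × List String)) (acc : PySem.Set String × Bool)
    (h : acc.1.Nodup) : (l.foldl pvStepA acc).1.Nodup := by
  induction l generalizing acc with
  | nil => simpa using h
  | cons pc l ih =>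
    simp only [List.foldl_cons]
    apply ih
    rcases pvStepA_cases acc pc with ⟨_, hs⟩ | ⟨_, _, hs⟩ | ⟨_, _, hs⟩ <;> rw [hs]
    · exact h
    · exact PySem.Set.nodup_add _ _ h
    · exact h

theorem pvPassA_sound (inf : List (String × List String)) (base : List String)
    (l : List (String × List String)) (hl : ∀ pc ∈ l, pc ∈ inf)
    (acc : PySem.Set String × Bool) (hacc : ∀ x ∈ acc.1, pvReach inf base x) :
    ∀ x ∈ (l.foldl pvStepA acc).1, pvReach inf base x := by
  induction l generalizing acc with
  | nil => intro x hx; exact hacc x hx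
  | cons pc l ih =>
    intro x hx
    simp only [List.foldl_cons] at hx
    refine ih (fun pc' h' => hl pc' (List.mem_cons_of_mem _ h')) _ ?_ x hx
    intro y hy
    rcases pvStepA_cases acc pc with ⟨_, hs⟩ | ⟨_, hany, hs⟩ | ⟨_, _, hs⟩
    · rw [hs] at hy; exact hacc y hy
    · rw [hs] at hy
      rcases (PySem.Set.mem_add _ _ _).mp hy with hy' | rfl
      · exact hacc y hy'
      · obtain ⟨c, hcmem, hcin⟩ := List.any_eq_true.mp hany
        exact pvReach.step pc.1 pc.2 c (hl pc (List.mem_cons_self ..)) hcmem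
          (hacc c ((PySem.Set.contains_iff _ _).mp hcin))
    · rw [hs] at hy; exact hacc y hy

theorem pvPassA_true (l : List (String × List String)) (acc : PySem.Set String × Bool)
    (h : acc.2 = true) : (l.foldl pvStepA acc).2 = true := by
  induction l generalizing acc with
  | nil => simpa using h
  | cons pc l ih =>
    simp only [List.foldl_cons]
    apply ih
    rcases pvStepA_cases acc pc with ⟨_, hs⟩ | ⟨_, _, hs⟩ | ⟨_, _, hs⟩ <;> rw [hs] <;> exact h

theorem pvPassA_false (l : List (String × List String)) (acc : PySem.Set String × Bool)
    (h : (l.foldl pvStepA acc).2 = false) :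
    l.foldl pvStepA acc = acc ∧
      ∀ pc ∈ l, PySem.Set.contains acc.1 pc.1 = true ∨
        pc.2.any (fun c => PySem.Set.contains acc.1 c) = false := by
  induction l generalizing acc with
  | nil => exact ⟨rfl, by simp⟩
  | cons pc l ih =>
    simp only [List.foldl_cons] at h ⊢
    rcases pvStepA_cases acc pc with ⟨hc, hs⟩ | ⟨hc, hany, hs⟩ | ⟨hc, hany, hs⟩
    · rw [hs] at h ⊢
      obtain ⟨heq, hprops⟩ := ih _ h
      refine ⟨heq, ?_⟩
      intro pc' hpc'
      rcases List.mem_cons.mp hpc' with rfl | h'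
      · exact Or.inl hc
      · exact hprops pc' h'
    · rw [hs] at h
      rw [pvPassA_true l _ rfl] at h
      cases h
    · rw [hs] at h ⊢
      obtain ⟨heq, hprops⟩ := ih _ h
      refine ⟨heq, ?_⟩
      intro pc' hpc'
      rcases List.mem_cons.mp hpc' with rfl | h'
      · exact Or.inr hany
      · exact hprops pc' h' 

theorem pvPassA_added (l : List (String × List String)) (acc : PySem.Set String × Bool)
    (h0 : acc.2 = false) (h : (l.foldl pvStepA acc).2 = true) :
    ∃ k, k ∈ (l.foldl pvStepA acc).1 ∧ k ∉ acc.1 ∧ k ∈ l.map Prod.fst := by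
  induction l generalizing acc with
  | nil => rw [List.foldl_nil, h0] at h; cases h
  | cons pc l ih =>
    simp only [List.foldl_cons] at h ⊢
    rcases pvStepA_cases acc pc with ⟨hc, hs⟩ | ⟨hc, hany, hs⟩ | ⟨hc, hany, hs⟩
    · rw [hs] at h ⊢
      obtain ⟨k, hk1, hk2, hk3⟩ := ih _ h0 h
      exact ⟨k, hk1, hk2, by simp [hk3]⟩
    · rw [hs] at h ⊢
      refine ⟨pc.1, ?_, ?_, by simp⟩
      · exact pvPassA_mono l _ pc.1 ((PySem.Set.mem_add _ _ _).mpr (Or.inr rfl))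
      · intro hmem
        rw [(PySem.Set.contains_iff _ _).mpr hmem] at hc
        cases hc
    · rw [hs] at h ⊢
      obtain ⟨k, hk1, hk2, hk3⟩ := ih _ h0 h
      exact ⟨k, hk1, hk2, by simp [hk3]⟩

def pvPot (inf : List (String × List String)) (S : PySem.Set String) : Nat :=
  (inf.map Prod.fst).countP (fun k => !(PySem.Set.contains S k))

theorem pvCountP_strict {α : Type} (l : List α) (p q : α → Bool)
    (hpq : ∀ x ∈ l, q x = true → p x = true)
    (hw : ∃ k ∈ l, p k = true ∧ q k = false) :
    l.countP q < l.countP p := by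
  induction l with
  | nil => simp at hw
  | cons a l ih =>
    obtain ⟨k, hk, hpk, hqk⟩ := hw
    rcases List.mem_cons.mp hk with rfl | hk'
    · have hle : l.countP q ≤ l.countP p :=
        List.countP_mono_left (fun x hx hqx => hpq x (List.mem_cons_of_mem _ hx) hqx)
      simp [hpk, hqk]
      omega
    · have hlt := ih (fun x hx hqx => hpq x (List.mem_cons_of_mem _ hx) hqx) ⟨k, hk', hpk, hqk⟩
      have ha : (if q a = true then 1 else 0) ≤ (if p a = true then 1 else 0) := by
        by_cases hq : q a = true
        · simp [hq, hpq a (List.mem_cons_self ..) hq]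
        · simp [hq]
      simp only [List.countP_cons]
      omega

theorem pvPot_decrease (inf : List (String × List String)) (S : PySem.Set String)
    (h : (pvPassA inf S).2 = true) : pvPot inf (pvPassA inf S).1 < pvPot inf S := by
  obtain ⟨k, hk1, hk2, hk3⟩ := pvPassA_added inf (S, false) rfl h
  unfold pvPot
  apply pvCountP_strict
  · intro x _ hx
    exact (pvNotContains S x).mpr
      (fun hs => (pvNotContains _ x).mp hx (pvPassA_mono inf (S, false) x hs))
  · refine ⟨k, hk3, (pvNotContains S k).mpr hk2, ?_⟩
    rw [Bool.not_eq_false']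
    exact (PySem.Set.contains_iff _ _).mpr hk1

theorem pvLoopA_spec (inf : List (String × List String)) (base : List String) :
    ∀ (fuel : Nat) (S : PySem.Set String), pvPot inf S < fuel → S.Nodup →
      (∀ x ∈ S, pvReach inf base x) →
      (∀ x ∈ S, x ∈ pvLoopA inf fuel S) ∧ (pvLoopA inf fuel S).Nodup ∧
        (∀ x ∈ pvLoopA inf fuel S, pvReach inf base x) ∧ pvClosed inf (pvLoopA inf fuel S) := by
  intro fuel
  induction fuel with
  | zero => intro S hpot _ _; omega
  | succ fuel ih =>
    intro S hpot hnd hsound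
    simp only [pvLoopA]
    by_cases hr : (pvPassA inf S).2 = true
    · rw [if_pos hr]
      have hsub := pvPassA_mono inf (S, false)
      have ih' := ih (pvPassA inf S).1
        (by have := pvPot_decrease inf S hr; omega)
        (pvPassA_nodup inf (S, false) hnd)
        (pvPassA_sound inf base inf (fun _ h => h) (S, false) hsound)
      exact ⟨fun x hx => ih'.1 x (hsub x hx), ih'.2.1, ih'.2.2.1, ih'.2.2.2⟩
    · rw [if_neg hr]
      obtain ⟨heq, hprops⟩ := pvPassA_false inf (S, false) (by simpa using hr)
      have h1 : (pvPassA inf S).1 = S := by unfold pvPassA; rw [heq]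
      rw [h1]
      refine ⟨fun x hx => hx, hnd, hsound, ?_⟩
      rintro pc hpc ⟨c, hc, hcS⟩
      rcases hprops pc hpc with hh | hh
      · exact (PySem.Set.contains_iff _ _).mp hh
      · exact absurd ((PySem.Set.contains_iff _ _).mpr hcS)
          (by simpa using List.any_eq_false.mp hh c hc)

theorem pvA_mem (tags : List String) (inf : List (String × List String)) :
    ((pvLoopA inf (inf.length + 1) (PySem.Set.ofList tags)).Nodup ∧
      ∀ x, x ∈ pvLoopA inf (inf.length + 1) (PySem.Set.ofList tags) ↔ pvReach inf tags x) := by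
  have hpot : pvPot inf (PySem.Set.ofList tags) < inf.length + 1 := by
    have h1 : pvPot inf (PySem.Set.ofList tags) ≤ (inf.map Prod.fst).length :=
      List.countP_le_length
    simp only [List.length_map] at h1
    omega
  have hs := pvLoopA_spec inf tags (inf.length + 1) (PySem.Set.ofList tags) hpot
    (PySem.Set.nodup_ofList tags)
    (fun x hx => pvReach.base x ((PySem.Set.mem_ofList _ _).mp hx))
  refine ⟨hs.2.1, fun x => ⟨fun hx => hs.2.2.1 x hx, ?_⟩⟩
  exact pvReach_subset inf tags _ hs.2.2.2
    (fun t ht => hs.1 t ((PySem.Set.mem_ofList _ _).mpr ht)) x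

-- ---- B-side ----
def pvEdges (inf : List (String × List String)) : List (String × String) :=
  inf.flatMap (fun pc => pc.2.map (fun c => (c, pc.1)))

theorem pvIndex_eq_aux (l : List (String × List String)) (d : PySem.Dict String (List String)) :
    l.foldl (fun d pc => pc.2.foldl (fun d c => d.modify c [] (fun x => x ++ [pc.1])) d) d =
      (pvEdges l).foldl (fun d p => d.modify p.1 [] (fun x => x ++ [p.2])) d := by
  induction l generalizing d with
  | nil => rfl
  | cons pc l ih =>
    simp only [List.foldl_cons, pvEdges, List.flatMap_cons, List.foldl_append, List.foldl_map]
    exact ih _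

theorem pvIndex_eq (inf : List (String × List String)) :
    pvIndex inf =
      (pvEdges inf).foldl (fun d p => d.modify p.1 [] (fun x => x ++ [p.2])) PySem.Dict.empty := by
  unfold pvIndex
  exact pvIndex_eq_aux inf PySem.Dict.empty

theorem pvIndex_getD (inf : List (String × List String)) (c : String) :
    (pvIndex inf).getD c [] = ((pvEdges inf).filter (fun e => e.1 == c)).map (fun e => e.2) := by
  rw [pvIndex_eq, PySem.Dict.getD_foldl_modify_append]
  rfl

theorem pvMem_index (inf : List (String × List String)) (c p : String) :
    p ∈ (pvIndex inf).getD c [] ↔ ∃ cs, (p, cs) ∈ inf ∧ c ∈ cs := by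
  rw [pvIndex_getD]
  constructor
  · intro hp
    simp only [List.mem_map, List.mem_filter] at hp
    obtain ⟨e, ⟨hmem, hec⟩, rfl⟩ := hp
    simp only [pvEdges, List.mem_flatMap, List.mem_map] at hmem
    obtain ⟨pc, hpc, c', hc', rfl⟩ := hmem
    simp only [beq_iff_eq] at hec
    subst hec
    exact ⟨pc.2, hpc, hc'⟩
  · rintro ⟨cs, hin, hc⟩
    simp only [List.mem_map, List.mem_filter]
    refine ⟨(c, p), ⟨?_, by simp⟩, rfl⟩
    simp only [pvEdges, List.mem_flatMap, List.mem_map]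
    exact ⟨(p, cs), hin, c, hc, rfl⟩

def pvPhi (inf : List (String × List String)) (reached : PySem.Set String)
    (stack : List String) : Nat :=
  stack.length + (pvEdges inf).countP (fun e => !(PySem.Set.contains reached e.1))

theorem pvCountP_split (l : List (String × String)) (reached : PySem.Set String) (t : String)
    (ht : t ∉ reached) :
    l.countP (fun e => !(PySem.Set.contains reached e.1)) =
      l.countP (fun e => !(PySem.Set.contains (PySem.Set.add reached t) e.1)) +
        l.countP (fun e => e.1 == t) := by
  induction l with
  | nil => rfl
  | cons e l ih =>
    obtain ⟨c, p⟩ := e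
    by_cases he : c = t
    · subst he
      have h1 : (fun e : String × String => !(PySem.Set.contains reached e.1)) (c, p) = true :=
        (pvNotContains _ _).mpr ht
      have h2 : ¬((fun e : String × String =>
          !(PySem.Set.contains (PySem.Set.add reached c) e.1)) (c, p) = true) := by
        show ¬((!(PySem.Set.contains (PySem.Set.add reached c) c)) = true)
        rw [(PySem.Set.contains_iff _ _).mpr ((PySem.Set.mem_add _ _ _).mpr (Or.inr rfl))]
        simp
      have h3 : (fun e : String × String => e.1 == c) (c, p) = true := by simp
      rw [List.countP_cons_of_pos (p := fun e : String × String => !(PySem.Set.contains reached e.1)) h1, List.countP_cons_of_neg (p := fun e : String × String => !(PySem.Set.contains (PySem.Set.add reached c) e.1)) h2,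
        List.countP_cons_of_pos (p := fun e : String × String => e.1 == c) h3, ih]
      omega
    · have h3 : ¬((fun e : String × String => e.1 == t) (c, p) = true) := by simpa using he
      have h2 : (PySem.Set.contains (PySem.Set.add reached t) c) =
          (PySem.Set.contains reached c) := by
        by_cases hm : c ∈ reached
        · rw [(PySem.Set.contains_iff _ _).mpr hm,
            (PySem.Set.contains_iff _ _).mpr ((PySem.Set.mem_add _ _ _).mpr (Or.inl hm))]
        · rw [(pvContains_eq_false _ _).mpr hm,
            (pvContains_eq_false _ _).mpr
              (fun hmem => ((PySem.Set.mem_add _ _ _).mp hmem).elim hm he)]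
      by_cases hb : (!(PySem.Set.contains reached c)) = true
      · have hb1 : (fun e : String × String => !(PySem.Set.contains reached e.1)) (c, p) = true := hb
        have hb2 : (fun e : String × String =>
            !(PySem.Set.contains (PySem.Set.add reached t) e.1)) (c, p) = true := by
          show (!(PySem.Set.contains (PySem.Set.add reached t) c)) = true
          rw [h2]; exact hb
        rw [List.countP_cons_of_pos (p := fun e : String × String => !(PySem.Set.contains reached e.1)) hb1, List.countP_cons_of_pos (p := fun e : String × String => !(PySem.Set.contains (PySem.Set.add reached t) e.1)) hb2,
          List.countP_cons_of_neg (p := fun e : String × String => e.1 == t) h3, ih]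
        omega
      · have hb1 : ¬((fun e : String × String => !(PySem.Set.contains reached e.1)) (c, p) = true) := hb
        have hb2 : ¬((fun e : String × String =>
            !(PySem.Set.contains (PySem.Set.add reached t) e.1)) (c, p) = true) := by
          show ¬((!(PySem.Set.contains (PySem.Set.add reached t) c)) = true)
          rw [h2]; exact hb
        rw [List.countP_cons_of_neg (p := fun e : String × String => !(PySem.Set.contains reached e.1)) hb1, List.countP_cons_of_neg (p := fun e : String × String => !(PySem.Set.contains (PySem.Set.add reached t) e.1)) hb2,
          List.countP_cons_of_neg (p := fun e : String × String => e.1 == t) h3, ih]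

theorem pvLoopB_spec (inf : List (String × List String)) (base : List String) :
    ∀ (fuel : Nat) (reached : PySem.Set String) (stack : List String),
      pvPhi inf reached stack < fuel → reached.Nodup →
      (∀ x ∈ reached, pvReach inf base x) →
      (∀ x ∈ stack, pvReach inf base x) →
      (∀ x ∈ base, x ∈ reached ∨ x ∈ stack) →
      (∀ pc ∈ inf, ∀ c ∈ pc.2, c ∈ reached → pc.1 ∈ reached ∨ pc.1 ∈ stack) →
      (pvLoopB (pvIndex inf) fuel reached stack).Nodup ∧
        (∀ x ∈ pvLoopB (pvIndex inf) fuel reached stack, pvReach inf base x) ∧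
        (∀ x ∈ base, x ∈ pvLoopB (pvIndex inf) fuel reached stack) ∧
        pvClosed inf (pvLoopB (pvIndex inf) fuel reached stack) := by
  intro fuel
  induction fuel with
  | zero => intro reached stack hphi _ _ _ _ _; exact absurd hphi (by omega)
  | succ fuel ih =>
    intro reached stack hphi hnd hsr hss hbc hinv
    cases stack with
    | nil =>
      simp only [pvLoopB]
      exact ⟨hnd, hsr, fun x hx => (hbc x hx).resolve_right (by simp),
        fun pc hpc h => by
          obtain ⟨c, hc, hcS⟩ := h
          exact (hinv pc hpc c hc hcS).resolve_right (by simp)⟩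
    | cons t rest =>
      simp only [pvLoopB]
      by_cases hct : PySem.Set.contains reached t = true
      · rw [if_pos hct]
        have ht : t ∈ reached := (PySem.Set.contains_iff _ _).mp hct
        apply ih reached rest
        · unfold pvPhi at hphi ⊢
          simp only [List.length_cons] at hphi
          omega
        · exact hnd
        · exact hsr
        · exact fun x hx => hss x (List.mem_cons_of_mem _ hx)
        · intro x hx
          rcases hbc x hx with h | h
          · exact Or.inl h
          · rcases List.mem_cons.mp h with rfl | h'
            · exact Or.inl ht
            · exact Or.inr h'
        · intro pc hpc c hc hcR
          rcases hinv pc hpc c hc hcR with h | h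
          · exact Or.inl h
          · rcases List.mem_cons.mp h with rfl | h'
            · exact Or.inl ht
            · exact Or.inr h'
      · rw [if_neg hct]
        have ht : t ∉ reached := fun hmem => hct ((PySem.Set.contains_iff _ _).mpr hmem)
        have htR : pvReach inf base t := hss t (List.mem_cons_self ..)
        apply ih
        · -- fuel bound
          have hsplit := pvCountP_split (pvEdges inf) reached t ht
          have hp : (((pvIndex inf).getD t []).filter
              (fun p => !(PySem.Set.contains (PySem.Set.add reached t) p))).length ≤
              (pvEdges inf).countP (fun e => e.1 == t) := by
            calc (((pvIndex inf).getD t []).filter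
                (fun p => !(PySem.Set.contains (PySem.Set.add reached t) p))).length
                ≤ ((pvIndex inf).getD t []).length := List.length_filter_le _ _
              _ = (pvEdges inf).countP (fun e => e.1 == t) := by
                  rw [pvIndex_getD]
                  rw [List.length_map, List.countP_eq_length_filter]
          unfold pvPhi at hphi ⊢
          simp only [List.length_cons, List.length_append] at hphi ⊢
          omega
        · exact PySem.Set.nodup_add _ _ hnd
        · intro x hx
          rcases (PySem.Set.mem_add _ _ _).mp hx with h | rfl
          · exact hsr x h
          · exact htR
        · intro x hx
          rcases List.mem_append.mp hx with h | h
          · obtain ⟨hxg, _⟩ := List.mem_filter.mp h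
            obtain ⟨cs, hin, hcin⟩ := (pvMem_index inf t x).mp hxg
            exact pvReach.step x cs t hin hcin htR
          · exact hss x (List.mem_cons_of_mem _ h)
        · intro x hx
          rcases hbc x hx with h | h
          · exact Or.inl ((PySem.Set.mem_add _ _ _).mpr (Or.inl h))
          · rcases List.mem_cons.mp h with rfl | h'
            · exact Or.inl ((PySem.Set.mem_add _ _ _).mpr (Or.inr rfl))
            · exact Or.inr (List.mem_append.mpr (Or.inr h'))
        · intro pc hpc c hc hcR'
          rcases (PySem.Set.mem_add _ _ _).mp hcR' with hcR | rfl
          · rcases hinv pc hpc c hc hcR with h | h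
            · exact Or.inl ((PySem.Set.mem_add _ _ _).mpr (Or.inl h))
            · rcases List.mem_cons.mp h with rfl | h'
              · exact Or.inl ((PySem.Set.mem_add _ _ _).mpr (Or.inr rfl))
              · exact Or.inr (List.mem_append.mpr (Or.inr h'))
          · have hpg : pc.1 ∈ (pvIndex inf).getD c [] :=
              (pvMem_index inf c pc.1).mpr ⟨pc.2, hpc, hc⟩
            by_cases hpr : pc.1 ∈ PySem.Set.add reached c
            · exact Or.inl hpr
            · refine Or.inr (List.mem_append.mpr (Or.inl (List.mem_filter.mpr ⟨hpg, ?_⟩)))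
              exact (pvNotContains _ _).mpr hpr

theorem pvB_mem (tags : List String) (inf : List (String × List String)) :
    ((pvLoopB (pvIndex inf) (tags.length + (inf.map (fun pc => pc.2.length)).sum + 1)
        PySem.Set.empty tags).Nodup ∧
      ∀ x, x ∈ pvLoopB (pvIndex inf) (tags.length + (inf.map (fun pc => pc.2.length)).sum + 1)
        PySem.Set.empty tags ↔ pvReach inf tags x) := by
  have hlen : (pvEdges inf).length = (inf.map (fun pc => pc.2.length)).sum := by
    unfold pvEdges
    rw [List.length_flatMap]
    simp [List.length_map]
  have hphi : pvPhi inf PySem.Set.empty tags <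
      tags.length + (inf.map (fun pc => pc.2.length)).sum + 1 := by
    have h1 : (pvEdges inf).countP (fun e => !(PySem.Set.contains PySem.Set.empty e.1)) ≤
        (pvEdges inf).length := List.countP_le_length
    unfold pvPhi
    omega
  have hempty : ∀ x : String, x ∉ (PySem.Set.empty : PySem.Set String) := by
    intro x hx
    simp [PySem.Set.empty] at hx
  have hs := pvLoopB_spec inf tags _ PySem.Set.empty tags hphi List.nodup_nil
    (fun x hx => absurd hx (hempty x))
    (fun x hx => pvReach.base x hx)
    (fun x hx => Or.inr hx)
    (fun pc _ c _ hcE => absurd hcE (hempty c))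
  refine ⟨hs.1, fun x => ⟨fun hx => hs.2.1 x hx, ?_⟩⟩
  exact pvReach_subset inf tags _ hs.2.2.2 hs.2.2.1 x

-- ===== VERDICT (by name: the statement is the Claim_ definition above) =====
theorem apply_inferences_spec : Claim_equal_apply_inferences := by
  intro tags inferences _
  unfold Spec_apply_inferences apply_inferences apply_inferences_alt
  by_cases h : inferences.isEmpty
  · simp [h]
  · simp only [h, Bool.false_eq_true, if_false]
    obtain ⟨hAnd, hA⟩ := pvA_mem tags inferences
    obtain ⟨hBnd, hB⟩ := pvB_mem tags inferences
    exact (PySem.List.sorted_id_eq_sorted_id_iff_perm _ _).mpr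
      ((List.perm_ext_iff_of_nodup hAnd hBnd).mpr (fun a => (hA a).trans ((hB a).symm)))
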